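-- pv_equiv track=rewrite | github.com/agiverse/agiverse-py | agiverse/memory_module/memory/reflection.py | _format_memory_content
-- ===== SOURCE A (Python) =====
-- def _format_memory_content(content: str) -> str:
--     if not content:
--         return ""
--
--     parts = []
--     current = ""
--     for char in content:
--         if char in ".!?":
--             current += char
--             if current.strip():
--                 parts.append(current.strip())
--             current = ""
--         else:
--             current += char
--     if current.strip():
--         parts.append(current.strip())
--
--     formatted_parts = []
--     for part in parts:
--         words = part.split()
--         if words:
--             words[0] = words[0].capitalize()
--             formatted = " ".join(words)
--             if not formatted[-1] in ".!?":
--                 formatted += "."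
--             formatted_parts.append(formatted)
--
--     return " ".join(formatted_parts)
-- ===== SOURCE B (Python) =====
-- TERM = ".!?"
--
-- def _chunks(s):
--     # split s into runs of non-terminator chars each with its trailing terminator;
--     # an unterminated tail becomes its own chunk
--     res = []
--     while s:
--         i = 0
--         while i < len(s) and s[i] not in TERM:
--             i += 1
--         if i == len(s):
--             res.append(s)
--             s = ""
--         else:
--             res.append(s[:i + 1])
--             s = s[i + 1:]
--     return res
--
-- def _format_memory_content(content: str) -> str:
--     if not content:
--         return ""
--     out = []
--     for chunk in _chunks(content):
--         words = chunk.split()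
--         if words:
--             s = " ".join([words[0].capitalize()] + words[1:])
--             out.append(s if s[-1] in TERM else s + ".")
--     return " ".join(out)
-- ===== Notes on version B (the rewrite author's own statement) =====
-- stated objective: alternative
-- what changed: Replaces A's character-by-character accumulator loop plus separate strip-and-collect pass with an index-scan chunker that slices the text at each sentence terminator, and fuses stripping into the per-chunk split/format step (no intermediate stripped-parts list).
import Mathlib
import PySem

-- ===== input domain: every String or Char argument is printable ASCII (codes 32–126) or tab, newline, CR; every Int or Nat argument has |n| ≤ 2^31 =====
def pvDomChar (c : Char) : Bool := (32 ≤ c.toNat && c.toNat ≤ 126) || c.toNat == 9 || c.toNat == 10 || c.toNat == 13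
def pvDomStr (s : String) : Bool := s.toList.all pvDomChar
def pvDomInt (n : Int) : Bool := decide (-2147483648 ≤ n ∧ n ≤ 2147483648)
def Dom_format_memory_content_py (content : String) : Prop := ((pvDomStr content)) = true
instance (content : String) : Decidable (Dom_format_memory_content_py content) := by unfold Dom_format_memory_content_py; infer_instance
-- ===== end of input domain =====

-- B replaces A's char-by-char accumulator loop + separate strip/collect pass by an
-- index-scan chunker that slices at each terminator and formats each chunk directly
-- (alternative decomposition, same cost). Shared helpers port shared Python built-ins.

-- `char in ".!?"`
def pvIsTerm (c : Char) : Bool := c == '.' || c == '!' || c == '?'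

-- port of str.capitalize(): first char upper, rest lower (exact on the ASCII domain)
def pvCap (w : List Char) : List Char :=
  match w with
  | [] => []
  | c :: r => PySem.Chars.upperChar c :: PySem.Chars.lower r

-- ===== PORT A =====
-- A's first loop: state (parts, current); the [] case is the code after the loop.
def pvLoopA : List Char → List Char → List (List Char) → List (List Char)
  | [], cur, parts =>
      if (PySem.Chars.strip cur).isEmpty then parts else parts ++ [PySem.Chars.strip cur]
  | c :: rest, cur, parts =>
      if pvIsTerm c then
        let cur' := cur ++ [c]
        pvLoopA rest []
          (if (PySem.Chars.strip cur').isEmpty then parts else parts ++ [PySem.Chars.strip cur'])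
      else
        pvLoopA rest (cur ++ [c]) parts

-- A's second loop body (formatted[-1] is safe: words nonempty ⇒ formatted nonempty)
def pvFmtA (acc : List (List Char)) (part : List Char) : List (List Char) :=
  match PySem.Chars.split₀ part with
  | [] => acc
  | w :: ws =>
      let formatted := PySem.Chars.join [' '] (pvCap w :: ws)
      let formatted := if pvIsTerm (formatted.getLastD ' ') then formatted else formatted ++ ['.']
      acc ++ [formatted]

def format_memory_content_py (content : String) : String :=
  if content.toList.isEmpty then "" else
    let parts := pvLoopA content.toList [] []
    let formatted_parts := parts.foldl pvFmtA []
    String.ofList (PySem.Chars.join [' '] formatted_parts)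

-- ===== PORT B =====
-- Source B's _chunks: scan to the first terminator (takeWhile/dropWhile = s[:i]/s[i:]),
-- emit the slice with its terminator, recurse on the rest.
def pvChunks : List Char → List (List Char)
  | [] => []
  | c :: cs =>
      match h : (c :: cs).dropWhile (fun x => !pvIsTerm x) with
      | [] => [c :: cs]
      | t :: r => ((c :: cs).takeWhile (fun x => !pvIsTerm x) ++ [t]) :: pvChunks r
termination_by s => s.length
decreasing_by
  have : (t :: r).length ≤ (c :: cs).length := h ▸ List.length_dropWhile_le _ _
  simp only [List.length_cons] at this ⊢
  omega

-- Source B's per-chunk formatting (s[-1] is safe: words nonempty ⇒ s nonempty)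
def pvFmtChunk (chunk : List Char) : Option (List Char) :=
  match PySem.Chars.split₀ chunk with
  | [] => none
  | w :: ws =>
      let s := PySem.Chars.join [' '] (pvCap w :: ws)
      some (if pvIsTerm (s.getLastD ' ') then s else s ++ ['.'])

def format_memory_content_py_alt (content : String) : String :=
  if content.toList.isEmpty then "" else
    String.ofList (PySem.Chars.join [' '] ((pvChunks content.toList).filterMap pvFmtChunk))

-- ===== PRECONDITION & SPEC =====
def Spec_format_memory_content_py (content : String) (out : String) : Prop := out = format_memory_content_py_alt content
instance (content : String) (out : String) : Decidable (Spec_format_memory_content_py content out) := by unfold Spec_format_memory_content_py; infer_instance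

-- ===== CLAIM (what is proved, stated in full; the proofs are below) =====
def Claim_equal_format_memory_content_py : Prop := ∀ (content : String), Dom_format_memory_content_py content → Spec_format_memory_content_py content (format_memory_content_py content)

-- ===== LEMMAS AND PROOFS =====

-- words-splitting spec: pvAux pend s = remaining words of s given pending word pend
def pvAux : List Char → List Char → List (List Char)
  | pend, [] => if pend.isEmpty then [] else [pend]
  | pend, c :: s =>
      if PySem.Chars.isspace c then
        if pend.isEmpty then pvAux [] s else pend :: pvAux [] s
      else pvAux (pend ++ [c]) s

theorem split₀_go_eq_aux (s : List Char) : ∀ cur acc,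
    PySem.Chars.split₀.go s cur acc = acc.reverse ++ pvAux cur.reverse s := by
  induction s with
  | nil =>
      intro cur acc
      simp [PySem.Chars.split₀.go, pvAux]
      by_cases h : cur.isEmpty <;> simp_all
  | cons c s ih =>
      intro cur acc
      simp only [PySem.Chars.split₀.go, pvAux]
      by_cases hs : PySem.Chars.isspace c <;> by_cases hc : cur.isEmpty <;>
        simp_all [ih] <;> simp_all [List.isEmpty_iff]

theorem split₀_eq_aux (s : List Char) : PySem.Chars.split₀ s = pvAux [] s := by
  simpa using split₀_go_eq_aux s [] []

theorem aux_allspace (t : List Char) (pend : List Char) (ht : ∀ c ∈ t, PySem.Chars.isspace c) :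
    pvAux pend t = if pend.isEmpty then [] else [pend] := by
  induction t generalizing pend with
  | nil => simp [pvAux]
  | cons c t ih =>
      have hc := ht c (by simp)
      have ht' : ∀ c ∈ t, PySem.Chars.isspace c := fun x hx => ht x (by simp [hx])
      by_cases hp : pend.isEmpty <;> simp [pvAux, hc, hp, ih _ ht']

theorem aux_append_spaces (s t pend : List Char) (ht : ∀ c ∈ t, PySem.Chars.isspace c) :
    pvAux pend (s ++ t) = pvAux pend s := by
  induction s generalizing pend with
  | nil => simp [aux_allspace t pend ht, pvAux]
  | cons c s ih =>
      by_cases hs : PySem.Chars.isspace c <;> simp [pvAux, hs, ih]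

theorem aux_dropWhile (s : List Char) :
    pvAux [] (s.dropWhile PySem.Chars.isspace) = pvAux [] s := by
  induction s with
  | nil => rfl
  | cons c s ih =>
      by_cases hs : PySem.Chars.isspace c <;> simp [List.dropWhile_cons, hs, pvAux, ih]

theorem split₀_strip (s : List Char) :
    PySem.Chars.split₀ (PySem.Chars.strip s) = PySem.Chars.split₀ s := by
  rw [split₀_eq_aux, split₀_eq_aux]
  unfold PySem.Chars.strip PySem.Chars.rstrip PySem.Chars.lstrip
  rw [← aux_dropWhile s]
  set l := s.dropWhile PySem.Chars.isspace with hl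
  have hsplit : l = (l.reverse.dropWhile PySem.Chars.isspace).reverse
      ++ (l.reverse.takeWhile PySem.Chars.isspace).reverse := by
    have h2 : (l.reverse.takeWhile PySem.Chars.isspace
        ++ l.reverse.dropWhile PySem.Chars.isspace).reverse = l := by
      rw [List.takeWhile_append_dropWhile]; simp
    conv_lhs => rw [← h2]
    rw [List.reverse_append]
  conv_rhs => rw [hsplit]
  rw [aux_append_spaces]
  intro c hc
  have : c ∈ l.reverse.takeWhile PySem.Chars.isspace := by simpa using hc
  exact List.mem_takeWhile_imp this

-- chunking with a pending prefix, matching A's accumulator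
def pvChunkRec : List Char → List Char → List (List Char)
  | cur, [] => [cur]
  | cur, c :: s => if pvIsTerm c then (cur ++ [c]) :: pvChunkRec [] s else pvChunkRec (cur ++ [c]) s

def pvStripF (ch : List Char) : Option (List Char) :=
  if (PySem.Chars.strip ch).isEmpty then none else some (PySem.Chars.strip ch)

theorem loopA_eq (s : List Char) : ∀ cur parts,
    pvLoopA s cur parts = parts ++ (pvChunkRec cur s).filterMap pvStripF := by
  induction s with
  | nil =>
      intro cur parts
      simp only [pvLoopA, pvChunkRec, List.filterMap, pvStripF]
      by_cases h : (PySem.Chars.strip cur).isEmpty <;> simp [h]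
  | cons c s ih =>
      intro cur parts
      simp only [pvLoopA, pvChunkRec]
      by_cases h : pvIsTerm c
      · simp only [h, if_true, ih, List.filterMap_cons, pvStripF]
        by_cases h2 : (PySem.Chars.strip (cur ++ [c])).isEmpty <;> simp [h2]
      · simp [h, ih]

def pvFmtPart (part : List Char) : Option (List Char) :=
  match PySem.Chars.split₀ part with
  | [] => none
  | w :: ws =>
      let formatted := PySem.Chars.join [' '] (pvCap w :: ws)
      some (if pvIsTerm (formatted.getLastD ' ') then formatted else formatted ++ ['.'])

theorem foldl_fmtA (parts : List (List Char)) : ∀ acc,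
    parts.foldl pvFmtA acc = acc ++ parts.filterMap pvFmtPart := by
  induction parts with
  | nil => simp
  | cons p parts ih =>
      intro acc
      simp only [List.foldl_cons, ih, List.filterMap_cons]
      cases hp : PySem.Chars.split₀ p with
      | nil => simp [pvFmtA, pvFmtPart, hp]
      | cons w ws => simp [pvFmtA, pvFmtPart, hp]

theorem split₀_nil : PySem.Chars.split₀ [] = [] := rfl

theorem stripF_bind_fmtPart (ch : List Char) :
    (pvStripF ch).bind pvFmtPart = pvFmtChunk ch := by
  by_cases h : (PySem.Chars.strip ch).isEmpty
  · have h0 : PySem.Chars.split₀ ch = [] := by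
      rw [← split₀_strip, List.isEmpty_iff.mp h, split₀_nil]
    simp [pvStripF, pvFmtChunk, h, h0]
  · have hb : (pvStripF ch).bind pvFmtPart = pvFmtPart (PySem.Chars.strip ch) := by
      simp [pvStripF, h]
    rw [hb]
    unfold pvFmtPart pvFmtChunk
    rw [split₀_strip]

theorem chunkRec_append (pre : List Char) (hpre : ∀ c ∈ pre, ¬ pvIsTerm c) :
    ∀ cur suf, pvChunkRec cur (pre ++ suf) = pvChunkRec (cur ++ pre) suf := by
  induction pre with
  | nil => simp
  | cons c pre ih =>
      intro cur suf
      have hc : ¬ pvIsTerm c := hpre c (by simp)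
      have hpre' : ∀ x ∈ pre, ¬ pvIsTerm x := fun x hx => hpre x (by simp [hx])
      simp only [List.cons_append, pvChunkRec, hc, if_neg, Bool.not_eq_true]
      rw [ih hpre' (cur ++ [c]) suf]
      simp

theorem pvChunks_nil : pvChunks [] = [] := by rw [pvChunks.eq_def]

theorem pvChunks_cons₁ (c : Char) (cs : List Char)
    (hd : (c :: cs).dropWhile (fun x => !pvIsTerm x) = []) : pvChunks (c :: cs) = [c :: cs] := by
  rw [pvChunks.eq_def]
  split
  · rename_i heq; cases heq
  · rename_i c' cs' heq
    injection heq with h1 h2; subst h1; subst h2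
    split
    · rfl
    · rename_i t r h; rw [hd] at h; cases h

theorem pvChunks_cons₂ (c : Char) (cs : List Char) (t : Char) (r : List Char)
    (hd : (c :: cs).dropWhile (fun x => !pvIsTerm x) = t :: r) :
    pvChunks (c :: cs) = ((c :: cs).takeWhile (fun x => !pvIsTerm x) ++ [t]) :: pvChunks r := by
  rw [pvChunks.eq_def]
  split
  · rename_i heq; cases heq
  · rename_i c' cs' heq
    injection heq with h1 h2; subst h1; subst h2
    split
    · rename_i h; rw [hd] at h; cases h
    · rename_i t' r' h; rw [hd] at h; injection h with h1 h2; subst h1; subst h2; rfl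

theorem chunkRec_eq_chunks (s : List Char) :
    pvChunkRec [] s = pvChunks s ∨ pvChunkRec [] s = pvChunks s ++ [[]] := by
  induction hn : s.length using Nat.strong_induction_on generalizing s with
  | _ n ih =>
  cases s with
  | nil => right; rw [pvChunks_nil]; rfl
  | cons c cs =>
      have hsp := List.takeWhile_append_dropWhile (p := fun x => !pvIsTerm x) (l := c :: cs)
      have hpre : ∀ x ∈ (c :: cs).takeWhile (fun x => !pvIsTerm x), ¬ pvIsTerm x := by
        intro x hx
        have := List.mem_takeWhile_imp hx
        simpa using this
      cases hd : (c :: cs).dropWhile (fun x => !pvIsTerm x) with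
      | nil =>
          left
          have htake : (c :: cs).takeWhile (fun x => !pvIsTerm x) = c :: cs := by
            rw [hd, List.append_nil] at hsp; exact hsp
          have h3 := chunkRec_append _ hpre ([] : List Char) []
          rw [List.append_nil, htake, List.nil_append] at h3
          rw [pvChunks_cons₁ c cs hd, h3]
          rfl
      | cons t r =>
          have hlen : r.length < n := by
            have h1 : (t :: r).length ≤ (c :: cs).length := hd ▸ List.length_dropWhile_le _ _
            simp only [List.length_cons] at h1 hn
            omega
          have ht : pvIsTerm t := by
            have := List.head_dropWhile_not (p := fun x => !pvIsTerm x) (l := c :: cs)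
              (by simp [hd])
            simpa [hd] using this
          have hrec : pvChunkRec [] (c :: cs)
              = ((c :: cs).takeWhile (fun x => !pvIsTerm x) ++ [t]) :: pvChunkRec [] r := by
            conv_lhs => rw [← hsp, hd]
            rw [chunkRec_append _ hpre [] (t :: r)]
            simp [pvChunkRec, ht]
          rw [pvChunks_cons₂ c cs t r hd]
          rcases ih r.length hlen r rfl with h | h
          · left; rw [hrec, h]
          · right; rw [hrec, h]; simp

theorem fmtChunk_nil : pvFmtChunk [] = none := rfl

theorem filterMap_chunkRec (s : List Char) :
    (pvChunkRec [] s).filterMap pvFmtChunk = (pvChunks s).filterMap pvFmtChunk := by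
  rcases chunkRec_eq_chunks s with h | h <;> rw [h]
  simp [fmtChunk_nil]

-- ===== VERDICT (by name: the statement is the Claim_ definition above) =====
theorem format_memory_content_py_spec : Claim_equal_format_memory_content_py := by
  intro content _
  unfold Spec_format_memory_content_py format_memory_content_py format_memory_content_py_alt
  by_cases h : content.toList.isEmpty
  · simp [h]
  · simp only [h, if_false]
    congr 1
    rw [loopA_eq, List.nil_append, foldl_fmtA, List.nil_append,
        List.filterMap_filterMap]
    have hfun : (fun ch => (pvStripF ch).bind pvFmtPart) = pvFmtChunk :=
      funext stripF_bind_fmtPart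
    rw [hfun, filterMap_chunkRec]
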